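-- pv_equiv track=rewrite | github.com/anaconda/anaconda-project | anaconda_project/internal/pixi_export.py | _expand_defaults_in_channels
-- ===== SOURCE A (Python) =====
-- def _expand_defaults_in_channels(channels, default_channels):
--     """Replace every `defaults` entry in ``channels`` with ``default_channels``.
--
--     Order is preserved; duplicates are removed (first wins).
--     """
--     out = []
--     seen = set()
--     for ch in channels:
--         if ch == 'defaults':
--             for d in default_channels:
--                 if d not in seen:
--                     seen.add(d)
--                     out.append(d)
--         elif ch not in seen:
--             seen.add(ch)
--             out.append(ch)
--     return out
-- ===== SOURCE B (Python) =====
-- def _expand_defaults_in_channels(channels, default_channels):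
--     """Replace every `defaults` entry in ``channels`` with ``default_channels``.
--
--     Two separate passes: first expand, then order-preserving dedup.
--     """
--     expanded = []
--     for ch in channels:
--         if ch == 'defaults':
--             expanded.extend(default_channels)
--         else:
--             expanded.append(ch)
--     return list(dict.fromkeys(expanded))
-- ===== Notes on version B (the rewrite author's own statement) =====
-- stated objective: simpler
-- what changed: Splits A's single interleaved expand-and-dedup loop with a seen set into two separate passes: one plain expansion loop, then an order-preserving dedup via dict.fromkeys.
import Mathlib
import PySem

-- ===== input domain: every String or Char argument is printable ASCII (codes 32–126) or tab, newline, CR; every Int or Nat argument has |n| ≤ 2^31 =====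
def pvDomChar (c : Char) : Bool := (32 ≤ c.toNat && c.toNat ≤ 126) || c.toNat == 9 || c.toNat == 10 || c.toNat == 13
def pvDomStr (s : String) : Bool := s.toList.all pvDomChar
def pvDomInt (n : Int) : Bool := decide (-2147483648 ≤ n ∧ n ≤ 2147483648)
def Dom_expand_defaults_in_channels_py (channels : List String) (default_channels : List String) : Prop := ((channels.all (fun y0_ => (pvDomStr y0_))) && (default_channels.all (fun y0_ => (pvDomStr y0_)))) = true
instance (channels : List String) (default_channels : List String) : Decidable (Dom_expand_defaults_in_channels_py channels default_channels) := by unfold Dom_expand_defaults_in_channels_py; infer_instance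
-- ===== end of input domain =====

-- B replaces A's single interleaved expand+dedup loop by two separate passes (expand, then dedup); same cost, simpler shape.
-- ===== PORT A =====
-- one channel step of A's loop: state is (out, seen)
def pvStepA (default_channels : List String) (st : List String × PySem.Set String) (ch : String) : List String × PySem.Set String :=
  if ch == "defaults" then
    default_channels.foldl
      (fun st d => if st.2.contains d then st else (st.1 ++ [d], st.2 ++ [d])) st
  else if st.2.contains ch then st
  else (st.1 ++ [ch], st.2 ++ [ch])

def expand_defaults_in_channels_py (channels : List String) (default_channels : List String) : List String :=
  (channels.foldl (pvStepA default_channels) ([], PySem.Set.empty)).1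

-- ===== PORT B =====
def expand_defaults_in_channels_py_alt (channels : List String) (default_channels : List String) : List String :=
  let expanded := channels.foldl
    (fun acc ch => if ch == "defaults" then acc ++ default_channels else acc ++ [ch]) []
  PySem.List.dedup expanded

-- ===== PRECONDITION & SPEC =====
def Spec_expand_defaults_in_channels_py (channels : List String) (default_channels : List String) (out : List String) : Prop := out = expand_defaults_in_channels_py_alt channels default_channels
instance (channels : List String) (default_channels : List String) (out : List String) : Decidable (Spec_expand_defaults_in_channels_py channels default_channels out) := by unfold Spec_expand_defaults_in_channels_py; infer_instance

-- ===== CLAIM (what is proved, stated in full; the proofs are below) =====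
def Claim_equal_expand_defaults_in_channels_py : Prop := ∀ (channels : List String) (default_channels : List String), Dom_expand_defaults_in_channels_py channels default_channels → Spec_expand_defaults_in_channels_py channels default_channels (expand_defaults_in_channels_py channels default_channels)

-- ===== LEMMAS AND PROOFS =====

-- first-wins insertion step, in membership form (proof-local helper)
def pvAdd (s : List String) (d : String) : List String := if d ∈ s then s else s ++ [d]

theorem pvAdd_eq_setAdd : PySem.Set.add = pvAdd := by
  funext s d
  simp [PySem.Set.add, PySem.Set.contains, pvAdd]

-- A's inner dedup-insert loop over default_channels, started with out = seen, folds pvAdd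
theorem pvInnerFold (dc : List String) (out : List String) :
    dc.foldl (fun (st : List String × List String) d =>
        if d ∈ st.2 then st else (st.1 ++ [d], st.2 ++ [d])) (out, out)
      = (dc.foldl pvAdd out, dc.foldl pvAdd out) := by
  induction dc generalizing out with
  | nil => rfl
  | cons d dc ih =>
    simp only [List.foldl_cons, pvAdd]
    by_cases h : d ∈ out
    · simpa [h] using ih out
    · simpa [h] using ih (out ++ [d])

-- A's whole loop, started with out = seen, folds pvAdd over each expanded piece
theorem pvAFold (dc : List String) (channels : List String) (out : List String) :
    (channels.foldl (pvStepA dc) (out, out)).1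
      = channels.foldl
          (fun s ch => (if ch == "defaults" then dc else [ch]).foldl pvAdd s) out := by
  induction channels generalizing out with
  | nil => rfl
  | cons ch chs ih =>
    simp only [List.foldl_cons, pvStepA]
    by_cases hch : ch == "defaults"
    · rw [if_pos hch, if_pos hch]
      have h1 : (fun (st : List String × PySem.Set String) d =>
          if st.2.contains d = true then st else (st.1 ++ [d], st.2 ++ [d]))
          = (fun (st : List String × List String) d =>
          if d ∈ st.2 then st else (st.1 ++ [d], st.2 ++ [d])) := by
        funext st d
        simp [PySem.Set.contains]
      rw [h1, pvInnerFold]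
      exact ih _
    · rw [if_neg hch, if_neg hch]
      by_cases hc : ch ∈ out
      · have hb : (PySem.Set.contains out ch) = true := by
          simp [PySem.Set.contains, hc]
        have ha : pvAdd out ch = out := by simp [pvAdd, hc]
        rw [if_pos hb]
        simpa [ha] using ih out
      · have hb : ¬ (PySem.Set.contains out ch) = true := by
          simp [PySem.Set.contains, hc]
        have ha : pvAdd out ch = out ++ [ch] := by simp [pvAdd, hc]
        rw [if_neg hb]
        simpa [ha] using ih (out ++ [ch])

-- folding pvAdd over a flatMap = folding the per-element inner folds
theorem pvFoldFlatMap (h : String → List String) (xs : List String) (s : List String) :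
    (xs.flatMap h).foldl pvAdd s
      = xs.foldl (fun s ch => (h ch).foldl pvAdd s) s := by
  induction xs generalizing s with
  | nil => rfl
  | cons x xs ih => simp [List.flatMap_cons, List.foldl_append, ih]

-- ===== VERDICT =====
theorem expand_defaults_in_channels_py_spec : Claim_equal_expand_defaults_in_channels_py := by
  intro channels dc _
  unfold Spec_expand_defaults_in_channels_py expand_defaults_in_channels_py
    expand_defaults_in_channels_py_alt
  have hfun : (fun (acc : List String) ch => if ch == "defaults" then acc ++ dc else acc ++ [ch])
      = (fun (acc : List String) ch => acc ++ (if ch == "defaults" then dc else [ch])) := by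
    funext acc ch; split <;> rfl
  rw [hfun, PySem.List.foldl_append_eq_flatMap, List.nil_append,
    PySem.List.dedup_eq_ofList, PySem.Set.ofList, pvAdd_eq_setAdd,
    pvFoldFlatMap]
  exact pvAFold dc channels []
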